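-- pv_equiv track=rewrite | github.com/tkderphu/english-learning | scripts/fix_data_sql_inserts.py | parse_tuple_fields
-- ===== SOURCE A (Python) =====
-- def parse_tuple_fields(tup: str) -> list[str]:
--     inner = tup[1:-1]
--     parts = []
--     cur = []
--     depth = 0
--     in_str = False
--     esc = False
--     for ch in inner:
--         if esc:
--             cur.append(ch)
--             esc = False
--             continue
--         if in_str:
--             cur.append(ch)
--             if ch == "\\":
--                 esc = True
--             elif ch == "'":
--                 in_str = False
--             continue
--         if ch == "'":
--             in_str = True
--             cur.append(ch)
--             continue
--         if ch == "(":
--             depth += 1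
--             cur.append(ch)
--             continue
--         if ch == ")":
--             depth -= 1
--             cur.append(ch)
--             continue
--         if ch == "," and depth == 0:
--             parts.append("".join(cur).strip())
--             cur = []
--             continue
--         cur.append(ch)
--     if cur:
--         parts.append("".join(cur).strip())
--     return parts
-- ===== SOURCE B (Python) =====
-- def parse_tuple_fields(tup: str) -> list[str]:
--     inner = tup[1:-1]
--     n = len(inner)
--     # one pass: record the positions of top-level commas, then slice between them
--     cuts = []
--     depth = 0
--     in_str = False
--     esc = False
--     for i, ch in enumerate(inner):
--         if esc:
--             esc = False
--         elif in_str: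
--             if ch == "\\":
--                 esc = True
--             elif ch == "'":
--                 in_str = False
--         elif ch == "'":
--             in_str = True
--         elif ch == "(":
--             depth += 1
--         elif ch == ")":
--             depth -= 1
--         elif ch == "," and depth == 0:
--             cuts.append(i)
--     bounds = [-1] + cuts + [n]
--     fields = [inner[a + 1:b] for a, b in zip(bounds, bounds[1:])]
--     if fields and fields[-1] == "":
--         fields.pop()
--     return [f.strip() for f in fields]
-- ===== Notes on version B (the rewrite author's own statement) =====
-- stated objective: alternative
-- what changed: Instead of accumulating per-field character buffers and emitting a stripped field at each top-level comma, B makes one pass that only records the positions of top-level commas, then produces the fields by slicing the source string between consecutive cut positions (dropping a trailing empty raw field) and stripping them.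
import Mathlib
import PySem

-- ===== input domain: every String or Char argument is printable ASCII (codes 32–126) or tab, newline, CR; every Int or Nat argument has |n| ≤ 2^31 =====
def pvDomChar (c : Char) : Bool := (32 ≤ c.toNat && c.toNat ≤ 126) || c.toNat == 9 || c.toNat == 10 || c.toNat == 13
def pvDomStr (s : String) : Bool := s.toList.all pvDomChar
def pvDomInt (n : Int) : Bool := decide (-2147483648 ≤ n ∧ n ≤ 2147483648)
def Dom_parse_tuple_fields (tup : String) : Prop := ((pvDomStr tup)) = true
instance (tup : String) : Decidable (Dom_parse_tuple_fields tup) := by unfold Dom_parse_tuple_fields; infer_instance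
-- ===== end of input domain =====

-- B replaces A's per-field character buffers by one pass that records top-level comma
-- positions and then slices the fields out of the source (objective: alternative).

-- ===== PORT A =====
-- the for-loop of A: state (parts, cur, depth, in_str, esc), branches in A's order
def pvLoopA : List Char → List String → List Char → Int → Bool → Bool → List String × List Char
  | [], parts, cur, _, _, _ => (parts, cur)
  | ch :: rest, parts, cur, d, s, e =>
    if e then pvLoopA rest parts (cur ++ [ch]) d s false
    else if s then
      if ch = '\\' then pvLoopA rest parts (cur ++ [ch]) d s true
      else if ch = '\'' then pvLoopA rest parts (cur ++ [ch]) d false e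
      else pvLoopA rest parts (cur ++ [ch]) d s e
    else if ch = '\'' then pvLoopA rest parts (cur ++ [ch]) d true e
    else if ch = '(' then pvLoopA rest parts (cur ++ [ch]) (d + 1) s e
    else if ch = ')' then pvLoopA rest parts (cur ++ [ch]) (d - 1) s e
    else if ch = ',' ∧ d = 0 then
      pvLoopA rest (parts ++ [String.ofList (PySem.Chars.strip cur)]) [] d s e
    else pvLoopA rest parts (cur ++ [ch]) d s e

def parse_tuple_fields (tup : String) : List String :=
  let inner := PySem.List.slice tup.toList (some 1) (some (-1))   -- tup[1:-1]
  let r := pvLoopA inner [] [] 0 false false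
  if r.2 ≠ [] then r.1 ++ [String.ofList (PySem.Chars.strip r.2)] else r.1

-- ===== PORT B =====
-- the for-loop of Source B over enumerate(inner): collects the indices of top-level commas
def pvCutsB : List Char → Int → Int → Bool → Bool → List Int
  | [], _, _, _, _ => []
  | ch :: rest, i, d, s, e =>
    if e then pvCutsB rest (i + 1) d s false
    else if s then
      if ch = '\\' then pvCutsB rest (i + 1) d s true
      else if ch = '\'' then pvCutsB rest (i + 1) d false e
      else pvCutsB rest (i + 1) d s e
    else if ch = '\'' then pvCutsB rest (i + 1) d true e
    else if ch = '(' then pvCutsB rest (i + 1) (d + 1) s e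
    else if ch = ')' then pvCutsB rest (i + 1) (d - 1) s e
    else if ch = ',' ∧ d = 0 then i :: pvCutsB rest (i + 1) d s e
    else pvCutsB rest (i + 1) d s e

def parse_tuple_fields_alt (tup : String) : List String :=
  let inner := PySem.List.slice tup.toList (some 1) (some (-1))   -- tup[1:-1]
  let n : Int := inner.length
  let bounds := -1 :: (pvCutsB inner 0 0 false false ++ [n])      -- [-1] + cuts + [n]
  -- [inner[a+1:b] for a, b in zip(bounds, bounds[1:])]
  let fields := (bounds.zip (PySem.List.slice bounds (some 1) none)).map
      (fun p => PySem.List.slice inner (some (p.1 + 1)) (some p.2))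
  -- 'if fields and fields[-1] == "": fields.pop()'  (getLast? = some [] already implies fields ≠ [])
  let fields := if fields.getLast? = some ([] : List Char) then fields.dropLast else fields
  fields.map (fun f => String.ofList (PySem.Chars.strip f))

-- ===== PRECONDITION & SPEC =====
def Spec_parse_tuple_fields (tup : String) (out : List String) : Prop := out = parse_tuple_fields_alt tup
instance (tup : String) (out : List String) : Decidable (Spec_parse_tuple_fields tup out) := by unfold Spec_parse_tuple_fields; infer_instance

-- ===== CLAIM (what is proved, stated in full; the proofs are below) =====
def Claim_equal_parse_tuple_fields : Prop := ∀ (tup : String), Dom_parse_tuple_fields tup → Spec_parse_tuple_fields tup (parse_tuple_fields tup)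

-- ===== LEMMAS AND PROOFS =====

-- reference: the raw (unstripped) fields of `inner`, built by recursion on the characters
def pvConsHead (ch : Char) : List (List Char) → List (List Char)
  | [] => [[ch]]
  | f :: fs => (ch :: f) :: fs

def pvSegs : List Char → Int → Bool → Bool → List (List Char)
  | [], _, _, _ => [[]]
  | ch :: rest, d, s, e =>
    if e then pvConsHead ch (pvSegs rest d s false)
    else if s then
      if ch = '\\' then pvConsHead ch (pvSegs rest d s true)
      else if ch = '\'' then pvConsHead ch (pvSegs rest d false e)
      else pvConsHead ch (pvSegs rest d s e)
    else if ch = '\'' then pvConsHead ch (pvSegs rest d true e)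
    else if ch = '(' then pvConsHead ch (pvSegs rest (d + 1) s e)
    else if ch = ')' then pvConsHead ch (pvSegs rest (d - 1) s e)
    else if ch = ',' ∧ d = 0 then [] :: pvSegs rest d s e
    else pvConsHead ch (pvSegs rest d s e)

def pvHeadApp (cur : List Char) : List (List Char) → List (List Char)
  | [] => [cur]
  | f :: fs => (cur ++ f) :: fs

def pvStripS (f : List Char) : String := String.ofList (PySem.Chars.strip f)

def pvPairs (inner : List Char) (bs : List Int) : List (List Char) :=
  (bs.zip bs.tail).map (fun p => PySem.List.slice inner (some (p.1 + 1)) (some p.2))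

lemma pvConsHead_ne_nil (ch : Char) (l : List (List Char)) : pvConsHead ch l ≠ [] := by
  cases l <;> simp [pvConsHead]

lemma pvSegs_ne_nil (cs : List Char) (d : Int) (s e : Bool) : pvSegs cs d s e ≠ [] := by
  cases cs with
  | nil => simp [pvSegs]
  | cons ch rest =>
    simp only [pvSegs]
    split_ifs <;> first | exact pvConsHead_ne_nil _ _ | simp

lemma pvHeadApp_consHead (cur : List Char) (ch : Char) (l : List (List Char)) :
    pvHeadApp cur (pvConsHead ch l) = pvHeadApp (cur ++ [ch]) l := by
  cases l <;> simp [pvConsHead, pvHeadApp]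

lemma pvHeadApp_nil_of_ne (l : List (List Char)) (h : l ≠ []) : pvHeadApp [] l = l := by
  cases l with
  | nil => exact absurd rfl h
  | cons f fs => simp [pvHeadApp]

-- A's loop in terms of the reference fields
lemma pvLoopA_eq (cs : List Char) : ∀ (parts : List String) (cur : List Char) (d : Int) (s e : Bool),
    pvLoopA cs parts cur d s e =
      (parts ++ ((pvHeadApp cur (pvSegs cs d s e)).dropLast).map pvStripS,
       (pvHeadApp cur (pvSegs cs d s e)).getLastD []) := by
  induction cs with
  | nil => intro parts cur d s e; simp [pvLoopA, pvSegs, pvHeadApp]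
  | cons ch rest ih =>
    intro parts cur d s e
    simp only [pvLoopA, pvSegs]
    split_ifs
    all_goals rw [ih]
    all_goals try (rw [pvHeadApp_consHead])
    -- the remaining goal is the top-level-comma branch
    rw [pvHeadApp_nil_of_ne _ (pvSegs_ne_nil rest d s e)]
    have hne := pvSegs_ne_nil rest d s e
    have happ : pvHeadApp cur ([] :: pvSegs rest d s e) = cur :: pvSegs rest d s e := by
      simp [pvHeadApp]
    rw [happ, List.dropLast_cons_of_ne_nil hne]
    cases h : pvSegs rest d s e with
    | nil => exact absurd h hne
    | cons f fs => simp [pvStripS, List.getLastD]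

-- every cut index produced from start i is ≥ i
lemma pvCutsB_lb (cs : List Char) : ∀ (i d : Int) (s e : Bool) (x : Int),
    x ∈ pvCutsB cs i d s e → i ≤ x := by
  induction cs with
  | nil => intro i d s e x hx; simp [pvCutsB] at hx
  | cons ch rest ih =>
    intro i d s e x hx
    simp only [pvCutsB] at hx
    split_ifs at hx
    all_goals try (exact le_trans (by omega) (ih _ _ _ _ x hx))
    -- the remaining case is the top-level-comma branch, where hx : x ∈ i :: …
    rcases List.mem_cons.mp hx with rfl | hx'
    · exact le_refl x
    · exact le_trans (by omega) (ih _ _ _ _ x hx')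

lemma pvSliceCons (inner : List Char) (i : Nat) (b : Int) (ch : Char) (rest : List Char)
    (hdrop : inner.drop i = ch :: rest) (hb : (i : Int) + 1 ≤ b) :
    PySem.List.slice inner (some (i : Int)) (some b) =
      ch :: PySem.List.slice inner (some ((i : Int) + 1)) (some b) := by
  have h1 : PySem.List.slice inner (some (i : Int)) (some b) =
      (inner.drop i).take (b.toNat - i) := by
    rw [PySem.List.slice_toNat inner (a := (i : Int)) (b := b) (by positivity) (by omega)]
    simp
  have h2 : PySem.List.slice inner (some ((i : Int) + 1)) (some b) =
      (inner.drop (i + 1)).take (b.toNat - (i + 1)) := by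
    rw [show ((i : Int) + 1) = ((i + 1 : Nat) : Int) by push_cast; ring,
        PySem.List.slice_toNat inner (a := ((i + 1 : Nat) : Int)) (b := b) (by positivity) (by omega)]
    simp
  rw [h1, h2, hdrop]
  have : inner.drop (i + 1) = rest := by
    rw [← List.drop_drop, hdrop]; simp
  rw [this, show b.toNat - i = (b.toNat - (i + 1)) + 1 by omega]
  simp [List.take_succ_cons]


lemma pvPairs_cons (inner : List Char) (a b : Int) (t : List Int) :
    pvPairs inner (a :: b :: t) =
      PySem.List.slice inner (some (a + 1)) (some b) :: pvPairs inner (b :: t) := by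
  simp [pvPairs]

-- one non-comma step of B's scan, in pvPairs form
lemma pvPairs_step (inner : List Char) (i : Nat) (ch : Char) (rest : List Char)
    (d : Int) (s e : Bool)
    (hdrop : inner.drop i = ch :: rest)
    (ih : pvPairs inner ((((i : Int) + 1) - 1) :: (pvCutsB rest ((i : Int) + 1) d s e ++ [(inner.length : Int)])) = pvSegs rest d s e) :
    pvPairs inner (((i : Int) - 1) :: (pvCutsB rest ((i : Int) + 1) d s e ++ [(inner.length : Int)])) =
      pvConsHead ch (pvSegs rest d s e) := by
  have hlt : i < inner.length := by
    have := congrArg List.length hdrop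
    simp [List.length_drop] at this
    omega
  obtain ⟨b1, t, hbt, hb1⟩ :
      ∃ b1 t, pvCutsB rest ((i : Int) + 1) d s e ++ [(inner.length : Int)] = b1 :: t ∧
        (i : Int) + 1 ≤ b1 := by
    cases hc : pvCutsB rest ((i : Int) + 1) d s e with
    | nil => exact ⟨(inner.length : Int), [], by simp, by exact_mod_cast hlt⟩
    | cons c cs' =>
      refine ⟨c, cs' ++ [(inner.length : Int)], by simp, ?_⟩
      exact pvCutsB_lb rest _ d s e c (hc ▸ List.mem_cons_self)
  rw [hbt] at ih ⊢
  rw [← ih, pvPairs_cons, pvPairs_cons]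
  rw [show (i : Int) - 1 + 1 = (i : Int) by ring, show (i : Int) + 1 - 1 + 1 = (i : Int) + 1 by ring]
  rw [pvSliceCons inner i b1 ch rest hdrop hb1]
  simp [pvConsHead]

-- B's cuts, turned into slices, are the reference fields
lemma pvCuts_segs (cs : List Char) : ∀ (inner : List Char) (i : Nat) (d : Int) (s e : Bool),
    inner.drop i = cs →
    pvPairs inner (((i : Int) - 1) :: (pvCutsB cs (i : Int) d s e ++ [(inner.length : Int)])) =
      pvSegs cs d s e := by
  induction cs with
  | nil =>
    intro inner i d s e hdrop
    have hlen : inner.length ≤ i := by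
      have := congrArg List.length hdrop; simp at this; omega
    simp only [pvCutsB, pvSegs, List.nil_append, pvPairs, List.tail_cons, List.zip_cons_cons]
    simp only [List.zip_nil_right, List.map_cons, List.map_nil]
    congr 1
    rw [show ((i : Int) - 1 + 1) = ((i : Nat) : Int) by ring, PySem.List.slice_natCast]
    rw [List.drop_eq_nil_of_le hlen]
    simp
  | cons ch rest ih =>
    intro inner i d s e hdrop
    have hlt : i < inner.length := by
      have := congrArg List.length hdrop
      simp [List.length_drop] at this
      omega
    have hdrop' : inner.drop (i + 1) = rest := by
      have : (inner.drop i).drop 1 = inner.drop (i + 1) := by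
        rw [List.drop_drop]
      rw [← this, hdrop]; simp
    have hcast : ((i + 1 : Nat) : Int) = (i : Int) + 1 := by push_cast; ring
    simp only [pvCutsB, pvSegs]
    split_ifs with h1 h2 h3 h4 h5 h6 h7
    · exact pvPairs_step inner i ch rest d s false hdrop (by rw [← hcast] at *; exact ih inner (i+1) d s false hdrop')
    · exact pvPairs_step inner i ch rest d s true hdrop (by rw [← hcast] at *; exact ih inner (i+1) d s true hdrop')
    · exact pvPairs_step inner i ch rest d false e hdrop (by rw [← hcast] at *; exact ih inner (i+1) d false e hdrop')
    · exact pvPairs_step inner i ch rest d s e hdrop (by rw [← hcast] at *; exact ih inner (i+1) d s e hdrop')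
    · exact pvPairs_step inner i ch rest d true e hdrop (by rw [← hcast] at *; exact ih inner (i+1) d true e hdrop')
    · exact pvPairs_step inner i ch rest (d+1) s e hdrop (by rw [← hcast] at *; exact ih inner (i+1) (d+1) s e hdrop')
    · exact pvPairs_step inner i ch rest (d-1) s e hdrop (by rw [← hcast] at *; exact ih inner (i+1) (d-1) s e hdrop')
    · -- top-level comma
      rw [List.cons_append, pvPairs_cons]
      rw [show (i : Int) - 1 + 1 = ((i : Nat) : Int) by ring]
      have hih := ih inner (i+1) d s e hdrop'
      rw [hcast, show (i : Int) + 1 - 1 = (i : Int) by ring] at hih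
      rw [hih]
      congr 1
      rw [PySem.List.slice_natCast]
      simp
    · exact pvPairs_step inner i ch rest d s e hdrop (by rw [← hcast] at *; exact ih inner (i+1) d s e hdrop')

-- ===== VERDICT (by name: the statement is the Claim_ definition above) =====
theorem parse_tuple_fields_spec : Claim_equal_parse_tuple_fields := by
  intro tup _
  unfold Spec_parse_tuple_fields parse_tuple_fields parse_tuple_fields_alt
  dsimp only
  have hSne := pvSegs_ne_nil (PySem.List.slice tup.toList (some 1) (some (-1))) 0 false false
  have hA := pvLoopA_eq (PySem.List.slice tup.toList (some 1) (some (-1))) [] [] 0 false false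
  rw [pvHeadApp_nil_of_ne _ hSne] at hA
  simp only [List.nil_append] at hA
  have hB := pvCuts_segs (PySem.List.slice tup.toList (some 1) (some (-1)))
      (PySem.List.slice tup.toList (some 1) (some (-1))) 0 0 false false (by simp)
  simp only [pvPairs, Nat.cast_zero, zero_sub, List.tail_cons] at hB
  rw [hA, PySem.List.slice_from_one, List.tail_cons, hB]
  dsimp only
  obtain ⟨l, b, hlb⟩ := (List.eq_nil_or_concat _).resolve_left hSne
  rw [List.concat_eq_append] at hlb
  rw [hlb]
  by_cases hb : b = ([] : List Char)
  · subst hb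
    simp [pvStripS]
  · simp [pvStripS, hb]
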